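-- pv_equiv track=rewrite | github.com/sarbeshtiwari/arc-agi-3 | environment_files/eg04/eg04.py | _hit_test_tokens
-- ===== SOURCE A (Python) =====
-- GRID_W = 64
--
-- TOKEN_SIZE = 8
--
-- TOKEN_GAP = 2
--
-- def _hit_test_tokens(tokens, click_x, click_y, base_y):
--     n = len(tokens)
--     if n == 0:
--         return -1
--     total_w = n * TOKEN_SIZE + (n - 1) * TOKEN_GAP
--     start_x = (GRID_W - total_w) // 2
--
--     for i in range(n):
--         tx = start_x + i * (TOKEN_SIZE + TOKEN_GAP)
--         ty = base_y
--         if tx <= click_x < tx + TOKEN_SIZE and ty <= click_y < ty + TOKEN_SIZE: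
--             return i
--     return -1
-- ===== SOURCE B (Python) =====
-- def _hit_test_tokens(tokens, click_x, click_y, base_y):
--     n = len(tokens)
--     if n == 0:
--         return -1
--     if not (base_y <= click_y < base_y + 8):
--         return -1
--     start_x = (64 - (10 * n - 2)) // 2
--     d = click_x - start_x
--     if d < 0:
--         return -1
--     i, r = divmod(d, 10)
--     if i < n and r < 8:
--         return i
--     return -1
-- ===== Notes on version B (the rewrite author's own statement) =====
-- stated objective: faster
-- what changed: Replaced the linear scan over token slots by direct arithmetic: divmod of the click offset by the slot pitch gives the candidate index, which is then bounds-checked.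
import Mathlib
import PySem

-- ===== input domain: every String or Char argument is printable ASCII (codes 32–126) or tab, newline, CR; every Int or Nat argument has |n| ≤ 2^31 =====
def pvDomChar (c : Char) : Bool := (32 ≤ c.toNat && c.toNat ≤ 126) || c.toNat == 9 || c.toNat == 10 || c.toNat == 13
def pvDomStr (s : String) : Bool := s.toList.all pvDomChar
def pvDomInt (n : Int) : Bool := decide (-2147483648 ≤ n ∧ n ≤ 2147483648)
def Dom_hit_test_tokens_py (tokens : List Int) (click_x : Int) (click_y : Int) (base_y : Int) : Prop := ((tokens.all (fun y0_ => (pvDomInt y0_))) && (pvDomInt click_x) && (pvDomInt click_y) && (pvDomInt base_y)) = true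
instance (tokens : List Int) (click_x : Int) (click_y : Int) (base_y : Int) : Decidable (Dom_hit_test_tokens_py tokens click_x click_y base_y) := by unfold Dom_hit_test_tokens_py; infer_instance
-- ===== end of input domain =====

-- B replaces A's linear scan over token slots by O(1) divmod arithmetic on the click offset.

-- ===== PORT A =====
-- the `for i in range(n)` loop with early return, over the remaining indices
def hitLoopA (click_x click_y base_y start_x : Int) : List Int → Int
  | [] => -1
  | i :: rest =>
    let tx := start_x + i * (8 + 2)
    let ty := base_y
    if tx ≤ click_x ∧ click_x < tx + 8 ∧ ty ≤ click_y ∧ click_y < ty + 8 then i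
    else hitLoopA click_x click_y base_y start_x rest

def hit_test_tokens_py (tokens : List Int) (click_x : Int) (click_y : Int) (base_y : Int) : Int :=
  let n : Int := tokens.length
  if n = 0 then -1
  else
    let total_w := n * 8 + (n - 1) * 2
    let start_x := PySem.Int.floordiv (64 - total_w) 2
    hitLoopA click_x click_y base_y start_x (PySem.List.pyRange 0 n 1)

-- ===== PORT B =====
def hit_test_tokens_py_alt (tokens : List Int) (click_x : Int) (click_y : Int) (base_y : Int) : Int :=
  let n : Int := tokens.length
  if n = 0 then -1
  else if ¬ (base_y ≤ click_y ∧ click_y < base_y + 8) then -1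
  else
    let start_x := PySem.Int.floordiv (64 - (10 * n - 2)) 2
    let d := click_x - start_x
    if d < 0 then -1
    else
      let i := PySem.Int.floordiv d 10
      let r := PySem.Int.mod d 10
      if i < n ∧ r < 8 then i else -1

-- ===== PRECONDITION & SPEC =====
def Spec_hit_test_tokens_py (tokens : List Int) (click_x : Int) (click_y : Int) (base_y : Int) (out : Int) : Prop := out = hit_test_tokens_py_alt tokens click_x click_y base_y
instance (tokens : List Int) (click_x : Int) (click_y : Int) (base_y : Int) (out : Int) : Decidable (Spec_hit_test_tokens_py tokens click_x click_y base_y out) := by unfold Spec_hit_test_tokens_py; infer_instance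

-- ===== CLAIM (what is proved, stated in full; the proofs are below) =====
def Claim_equal_hit_test_tokens_py : Prop := ∀ (tokens : List Int) (click_x : Int) (click_y : Int) (base_y : Int), Dom_hit_test_tokens_py tokens click_x click_y base_y → Spec_hit_test_tokens_py tokens click_x click_y base_y (hit_test_tokens_py tokens click_x click_y base_y)

-- ===== LEMMAS AND PROOFS =====

-- the loop returns -1 when no index in the list hits
theorem hitLoopA_none (cx cy by_ sx : Int) (L : List Int)
    (h : ∀ i ∈ L, ¬ (sx + i * (8 + 2) ≤ cx ∧ cx < sx + i * (8 + 2) + 8 ∧ by_ ≤ cy ∧ cy < by_ + 8)) :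
    hitLoopA cx cy by_ sx L = -1 := by
  induction L with
  | nil => rfl
  | cons i rest ih =>
    simp only [hitLoopA]
    rw [if_neg (h i (List.mem_cons_self))]
    exact ih (fun j hj => h j (List.mem_cons_of_mem _ hj))

-- the loop returns j when j is the unique hitting index present in the list
theorem hitLoopA_found (cx cy by_ sx : Int) (L : List Int) (j : Int)
    (hj : j ∈ L)
    (hC : sx + j * (8 + 2) ≤ cx ∧ cx < sx + j * (8 + 2) + 8 ∧ by_ ≤ cy ∧ cy < by_ + 8)
    (huniq : ∀ i ∈ L, (sx + i * (8 + 2) ≤ cx ∧ cx < sx + i * (8 + 2) + 8 ∧ by_ ≤ cy ∧ cy < by_ + 8) → i = j) :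
    hitLoopA cx cy by_ sx L = j := by
  induction L with
  | nil => cases hj
  | cons i rest ih =>
    simp only [hitLoopA]
    by_cases hi : sx + i * (8 + 2) ≤ cx ∧ cx < sx + i * (8 + 2) + 8 ∧ by_ ≤ cy ∧ cy < by_ + 8
    · rw [if_pos hi]; exact huniq i List.mem_cons_self hi
    · rw [if_neg hi]
      rcases List.mem_cons.mp hj with h | h
      · exact absurd hC (h ▸ hi)
      · exact ih h (fun k hk => huniq k (List.mem_cons_of_mem _ hk))

-- ===== VERDICT (by name: the statement is the Claim_ definition above) =====
theorem hit_test_tokens_py_spec : Claim_equal_hit_test_tokens_py := by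
  intro tokens cx cy by_ _
  unfold Spec_hit_test_tokens_py hit_test_tokens_py hit_test_tokens_py_alt
  set n : Int := (tokens.length : Int) with hn
  by_cases h0 : n = 0
  · simp [h0]
  · rw [if_neg h0, if_neg h0]
    dsimp only
    have harg : 64 - (n * 8 + (n - 1) * 2) = 64 - (10 * n - 2) := by ring
    rw [harg]
    set sx := PySem.Int.floordiv (64 - (10 * n - 2)) 2 with hsx
    by_cases hy : by_ ≤ cy ∧ cy < by_ + 8
    · rw [if_neg (by simpa using hy)]
      set d := cx - sx with hd
      have hdm := PySem.Int.floordiv_mul_add_mod d 10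
      have hr0 : 0 ≤ PySem.Int.mod d 10 := PySem.Int.mod_nonneg d (by norm_num)
      have hr10 : PySem.Int.mod d 10 < 10 := PySem.Int.mod_lt d (by norm_num)
      set q := PySem.Int.floordiv d 10 with hq
      set r := PySem.Int.mod d 10 with hr
      by_cases hdneg : d < 0
      · rw [if_pos hdneg]
        apply hitLoopA_none
        intro i hi hCi
        have hib := (PySem.List.mem_pyRange_one).mp hi
        -- 0 ≤ i and sx + 10 i ≤ cx contradict d < 0
        omega
      · rw [if_neg hdneg]
        by_cases hok : q < n ∧ r < 8
        · rw [if_pos hok]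
          apply hitLoopA_found
          · exact (PySem.List.mem_pyRange_one).mpr (by omega)
          · constructor
            · omega
            · refine ⟨by omega, hy.1, hy.2⟩
          · intro i hi hCi
            have hib := (PySem.List.mem_pyRange_one).mp hi
            omega
        · rw [if_neg hok]
          apply hitLoopA_none
          intro i hi hCi
          have hib := (PySem.List.mem_pyRange_one).mp hi
          omega
    · rw [if_pos (by simpa using hy)]
      apply hitLoopA_none
      intro i hi hCi
      exact hy ⟨hCi.2.2.1, hCi.2.2.2⟩
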